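-- pv_equiv track=rewrite | github.com/Jhordan1030/repo-anaalg | Trabajo3/Ejercicio3.py | procesar_arreglo_recursivo
-- ===== SOURCE A (Python) =====
-- def suma_digitos_multiplo_recursivo(numero, n, indice=0, suma=0):
--     digitos = str(numero)
--
--     # Condición de salida: si hemos procesado todos los dígitos o si n llega a 0
--     if indice == len(digitos) or n == 0:
--         return suma
--
--     digito = int(digitos[indice])
--     if digito % n == 0:
--         suma += digito
--
--     # Llamada recursiva con índice incrementado y n decrementado
--     return suma_digitos_multiplo_recursivo(numero, n - 1, indice + 1, suma)
--
-- def procesar_arreglo_recursivo(A, n, indice=0, B=None):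
--     if B is None:
--         B = []
--
--     # Condición de salida para la recursión
--     if indice == len(A):
--         return B
--
--     # Llamar a la función recursiva para calcular la suma de los dígitos múltiplos
--     suma = suma_digitos_multiplo_recursivo(A[indice], n)
--
--     # Agregar el resultado al arreglo B
--     B.append(suma)
--
--     # Llamada recursiva al siguiente número en el arreglo
--     return procesar_arreglo_recursivo(A, n, indice + 1, B)
-- ===== SOURCE B (Python) =====
-- def procesar_arreglo_recursivo(A, n, indice=0, B=None):
--     # Iterative re-implementation: two nested loops replace the two recursions.
--     # The divisor for digit position i is n - i (A decrements n while walking digits);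
--     # mutates/returns the same B list, like A.
--     if B is None:
--         B = []
--     for idx in range(indice, len(A)):
--         total = 0
--         for i, ch in enumerate(str(A[idx])):
--             if i == n:
--                 break
--             d = int(ch)
--             if d % (n - i) == 0:
--                 total += d
--         B.append(total)
--     return B
-- ===== Notes on version B (the rewrite author's own statement) =====
-- stated objective: simpler
-- what changed: Both recursions (over array positions and over digit positions with a decrementing n) are collapsed into two plain nested loops: for each idx in range(indice, len(A)) an enumerate over str(A[idx]) with divisor n - i and break at i == n; same B mutation and return value.
import Mathlib
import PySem

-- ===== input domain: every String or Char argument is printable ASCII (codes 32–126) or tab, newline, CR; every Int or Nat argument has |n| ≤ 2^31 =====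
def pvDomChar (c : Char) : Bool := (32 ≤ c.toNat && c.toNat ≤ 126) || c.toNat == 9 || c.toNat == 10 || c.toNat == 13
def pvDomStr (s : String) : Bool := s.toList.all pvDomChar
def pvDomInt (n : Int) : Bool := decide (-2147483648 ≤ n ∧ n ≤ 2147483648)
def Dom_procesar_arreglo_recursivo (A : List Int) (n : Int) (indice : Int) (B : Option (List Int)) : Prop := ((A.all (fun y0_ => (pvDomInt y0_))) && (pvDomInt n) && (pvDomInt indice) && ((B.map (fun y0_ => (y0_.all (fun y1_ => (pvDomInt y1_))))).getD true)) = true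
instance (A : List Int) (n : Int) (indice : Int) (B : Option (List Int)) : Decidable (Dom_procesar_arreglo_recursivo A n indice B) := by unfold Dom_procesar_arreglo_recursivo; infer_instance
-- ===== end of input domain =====

-- B replaces A's two recursions with two plain nested loops (digit divisor n - i, break at
-- i == n); equivalence is about the return value, and B performs the same append-mutation of B.

-- ===== PORT A =====
-- suma_digitos_multiplo_recursivo: recursion over the digit string, n decrementing.
-- int(digitos[indice]) is ported as ofStr? of the one-char string, defaulting to 0 where
-- Python would raise ValueError (those inputs are outside Pre_).
def pvSumaDigA (digs : List Char) (n : Int) (suma : Int) : Int :=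
  match digs with
  | [] => suma
  | c :: rest =>
    if n = 0 then suma
    else
      let digito : Int := (PySem.Int.ofStr? (String.ofList [c])).getD 0
      let suma' := if PySem.Int.mod digito n = 0 then suma + digito else suma
      pvSumaDigA rest (n - 1) suma'

def pvSumaA (numero : Int) (n : Int) : Int :=
  pvSumaDigA (PySem.Int.toStr numero).toList n 0

-- procesar_arreglo_recursivo: structural recursion on fuel; each step is one Python
-- recursive call (stop at indice == len(A), else look up A[indice], append, recurse).
-- A[indice] via pyGet? with default 0 where Python raises IndexError (outside Pre_).
def pvProcA (A : List Int) (n : Int) (indice : Int) (acc : List Int) (fuel : Nat) : List Int :=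
  match fuel with
  | 0 => acc
  | fuel + 1 =>
    if indice = (A.length : Int) then acc
    else
      let x : Int := (PySem.List.pyGet? A indice).getD 0
      pvProcA A n (indice + 1) (acc ++ [pvSumaA x n]) fuel

def procesar_arreglo_recursivo (A : List Int) (n : Int) (indice : Int) (B : Option (List Int)) : List Int :=
  pvProcA A n indice (B.getD []) (A.length + indice.natAbs + 1)

-- ===== PORT B =====
-- inner loop: for i, ch in enumerate(str(A[idx])): if i == n: break; ...
def pvSumaB (digs : List Char) (i : Int) (n : Int) (total : Int) : Int :=
  match digs with
  | [] => total
  | c :: rest =>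
    if i = n then total
    else
      let d : Int := (PySem.Int.ofStr? (String.ofList [c])).getD 0
      let total' := if PySem.Int.mod d (n - i) = 0 then total + d else total
      pvSumaB rest (i + 1) n total'

def procesar_arreglo_recursivo_alt (A : List Int) (n : Int) (indice : Int) (B : Option (List Int)) : List Int :=
  (PySem.List.pyRange indice (A.length : Int) 1).foldl
    (fun acc idx =>
      let x : Int := (PySem.List.pyGet? A idx).getD 0
      acc ++ [pvSumaB (PySem.Int.toStr x).toList 0 n 0])
    (B.getD [])

-- ===== PRECONDITION & SPEC =====
-- Pre_ excludes exactly the inputs where the Python A raises: indice outside [-len(A), len(A)]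
-- (IndexError on A[indice]) and, for n ≠ 0, a negative number among the processed elements
-- (int('-') raises ValueError); B raises on the same inputs.
def Pre_procesar_arreglo_recursivo (A : List Int) (n : Int) (indice : Int) (B : Option (List Int)) : Prop :=
  -(A.length : Int) ≤ indice ∧ indice ≤ (A.length : Int) ∧
  (n = 0 ∨ ∀ x ∈ (if indice < 0 then A else A.drop indice.toNat), 0 ≤ x)
instance (A : List Int) (n : Int) (indice : Int) (B : Option (List Int)) : Decidable (Pre_procesar_arreglo_recursivo A n indice B) := by unfold Pre_procesar_arreglo_recursivo; infer_instance

def pvWitness_procesar_arreglo_recursivo : List Int × Int × Int × Option (List Int) := ([10, 23], 2, 0, none)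

def Spec_procesar_arreglo_recursivo (A : List Int) (n : Int) (indice : Int) (B : Option (List Int)) (out : List Int) : Prop := out = procesar_arreglo_recursivo_alt A n indice B
instance (A : List Int) (n : Int) (indice : Int) (B : Option (List Int)) (out : List Int) : Decidable (Spec_procesar_arreglo_recursivo A n indice B out) := by unfold Spec_procesar_arreglo_recursivo; infer_instance

-- ===== CLAIM (what is proved, stated in full; the proofs are below) =====
def Claim_equal_procesar_arreglo_recursivo : Prop := ∀ (A : List Int) (n : Int) (indice : Int) (B : Option (List Int)), Dom_procesar_arreglo_recursivo A n indice B → Pre_procesar_arreglo_recursivo A n indice B → Spec_procesar_arreglo_recursivo A n indice B (procesar_arreglo_recursivo A n indice B)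

-- ===== LEMMAS AND PROOFS =====

-- B's inner loop at position i with fixed n equals A's inner recursion with divisor n - i.
theorem pvSuma_agree (digs : List Char) (i n total : Int) :
    pvSumaB digs i n total = pvSumaDigA digs (n - i) total := by
  induction digs generalizing i total with
  | nil => rfl
  | cons c rest ih =>
    simp only [pvSumaB, pvSumaDigA]
    by_cases h : i = n
    · simp [h]
    · have h' : ¬ (n - i = 0) := by omega
      simp only [if_neg h, if_neg h']
      rw [ih]
      ring_nf

theorem pvProc_agree (A : List Int) (n : Int) (indice : Int) (acc : List Int) (fuel : Nat)
    (h1 : indice ≤ (A.length : Int)) (h2 : (A.length : Int) - indice ≤ (fuel : Int)) :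
    pvProcA A n indice acc fuel =
      (PySem.List.pyRange indice (A.length : Int) 1).foldl
        (fun acc idx =>
          let x : Int := (PySem.List.pyGet? A idx).getD 0
          acc ++ [pvSumaB (PySem.Int.toStr x).toList 0 n 0]) acc := by
  induction fuel generalizing indice acc with
  | zero =>
    have he : indice = (A.length : Int) := by omega
    simp [pvProcA, he, PySem.List.pyRange_one_eq_nil (le_refl _)]
  | succ fuel ih =>
    by_cases he : indice = (A.length : Int)
    · simp [pvProcA, he, PySem.List.pyRange_one_eq_nil (le_refl _)]
    · have hlt : indice < (A.length : Int) := lt_of_le_of_ne h1 he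
      rw [PySem.List.pyRange_one_cons hlt]
      simp only [pvProcA, if_neg he, List.foldl_cons]
      rw [ih (indice + 1) _ (by omega) (by omega)]
      congr 1
      simp [pvSumaA, pvSuma_agree]

-- ===== VERDICT (by name: the statement is the Claim_ definition above) =====
theorem procesar_arreglo_recursivo_spec : Claim_equal_procesar_arreglo_recursivo := by
  intro A n indice B _dom hpre
  unfold Spec_procesar_arreglo_recursivo procesar_arreglo_recursivo procesar_arreglo_recursivo_alt
  rw [pvProc_agree A n indice _ _ hpre.2.1 (by omega)]
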